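-- pv_equiv track=rewrite | github.com/kgw012/GUMI1_ALGO_STUDY | 210809_stackNQueue/GilWoong/problem/stock_price.py | solution
-- ===== SOURCE A (Python) =====
-- class Stock:
--     def __init__(self, price, time):
--         self.price = price
--         self.time = time
--
-- def solution(prices):
--
--     answer = [0 for _ in range(len(prices))]
--
--     stack = []
--
--     time = 0
--
--     while time < len(prices):
--         if len(stack) == 0:
--             stack.append(Stock(prices[time], time))
--             time += 1
--             continue
--
--         price = prices[time]
--         top = stack[-1]
--
--         if top.price > price:
--             answer[top.time] = time - top.time
--             stack.pop()
--             continue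
--
--         stack.append(Stock(price, time))
--         time += 1
--
--     time -= 1
--
--     while len(stack):
--         pop = stack.pop()
--         answer[pop.time] = time - pop.time
--
--     return answer
-- ===== SOURCE B (Python) =====
-- def solution(prices):
--     n = len(prices)
--     answer = []
--     for i in range(n):
--         d = (n - 1) - i
--         for j in range(i + 1, n):
--             if prices[j] < prices[i]:
--                 d = j - i
--                 break
--         answer.append(d)
--     return answer
-- ===== Notes on version B (the rewrite author's own statement) =====
-- stated objective: simpler
-- what changed: Replaced the monotonic stack with a direct nested scan: for each index, find the first later index with a strictly smaller price (else use the last index).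
import Mathlib
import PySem

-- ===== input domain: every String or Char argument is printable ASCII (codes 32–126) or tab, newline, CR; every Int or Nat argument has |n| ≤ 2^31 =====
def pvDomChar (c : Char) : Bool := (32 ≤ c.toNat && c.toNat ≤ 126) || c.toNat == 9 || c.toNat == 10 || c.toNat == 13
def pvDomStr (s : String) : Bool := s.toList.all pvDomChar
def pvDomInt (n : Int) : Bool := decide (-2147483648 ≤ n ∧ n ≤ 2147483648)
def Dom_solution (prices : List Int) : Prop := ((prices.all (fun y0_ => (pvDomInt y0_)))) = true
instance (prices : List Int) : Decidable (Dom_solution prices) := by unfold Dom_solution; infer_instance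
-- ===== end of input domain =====

-- B replaces A's monotonic stack with a plain nested scan (first later strictly smaller price); return values proved equal.

-- ===== PORT A =====
-- stack is represented head-first (Python's stack[-1] / append / pop act on our head);
-- entries are (price, time) like the Stock objects.

-- final while loop of A: drain the stack, writing (time-1) - pop.time at each popped time
def drainA (answer : List Int) (stack : List (Int × Nat)) (tlast : Int) : List Int :=
  match stack with
  | [] => answer
  | (_, t) :: rest => drainA (answer.set t (tlast - (t : Int))) rest tlast

-- main while loop of A
def loopA (prices : List Int) (answer : List Int) (stack : List (Int × Nat)) (time : Nat) :
    List Int :=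
  if _h : time < prices.length then
    match stack with
    | [] => loopA prices answer [(prices.getD time 0, time)] (time + 1)
    | (tp, tt) :: rest =>
      if prices.getD time 0 < tp then
        loopA prices (answer.set tt ((time : Int) - (tt : Int))) rest time
      else
        loopA prices answer ((prices.getD time 0, time) :: (tp, tt) :: rest) (time + 1)
  else
    drainA answer stack ((time : Int) - 1)
termination_by 2 * (prices.length - time) + stack.length
decreasing_by all_goals first | (simp; omega) | simp

def solution (prices : List Int) : List Int :=
  loopA prices (List.replicate prices.length 0) [] 0

-- ===== PORT B =====
-- inner for-loop of B: first index j ≥ start with prices[j] < pi (break), none if the loop ends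
def findDrop (prices : List Int) (pi : Int) (j : Nat) : Option Nat :=
  if _h : j < prices.length then
    if prices.getD j 0 < pi then some j else findDrop prices pi (j + 1)
  else none
termination_by prices.length - j

def bVal (prices : List Int) (i : Nat) : Int :=
  match findDrop prices (prices.getD i 0) (i + 1) with
  | some j => (j : Int) - (i : Int)
  | none => (prices.length : Int) - 1 - (i : Int)

def solution_alt (prices : List Int) : List Int :=
  (List.range prices.length).map (bVal prices)

-- ===== PRECONDITION & SPEC =====
def Spec_solution (prices : List Int) (out : List Int) : Prop := out = solution_alt prices
instance (prices : List Int) (out : List Int) : Decidable (Spec_solution prices out) := by unfold Spec_solution; infer_instance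

-- ===== CLAIM (what is proved, stated in full; the proofs are below) =====
def Claim_equal_solution : Prop := ∀ (prices : List Int), Dom_solution prices → Spec_solution prices (solution prices)

-- ===== LEMMAS AND PROOFS =====

-- invariant of A's stack: entries carry their own price, times strictly decrease down the
-- stack while prices do not increase, every entry is older than `time`, and no index strictly
-- between an entry's time and `time` has a strictly smaller price
def InvStack (prices : List Int) (time : Nat) (stack : List (Int × Nat)) : Prop :=
  List.Pairwise (fun a b => b.1 ≤ a.1 ∧ b.2 < a.2) stack ∧
  ∀ x ∈ stack, x.1 = prices.getD x.2 0 ∧ x.2 < time ∧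
    ∀ j, x.2 < j → j < time → x.1 ≤ prices.getD j 0

theorem getD_set_self (l : List Int) (i : Nat) (v : Int) (h : i < l.length) :
    (l.set i v).getD i 0 = v := by
  simp [List.getD, h]

theorem getD_set_ne (l : List Int) (i j : Nat) (v : Int) (h : i ≠ j) :
    (l.set i v).getD j 0 = l.getD j 0 := by
  simp [List.getD, h]

theorem findDrop_none (prices : List Int) (pi : Int) (s : Nat)
    (h : ∀ j, s ≤ j → j < prices.length → pi ≤ prices.getD j 0) :
    findDrop prices pi s = none := by
  unfold findDrop
  split
  · rename_i hlt
    have := h s le_rfl hlt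
    rw [if_neg (by omega)]
    exact findDrop_none prices pi (s + 1) (fun j hj hj' => h j (by omega) hj')
  · rfl
termination_by prices.length - s

theorem findDrop_some (prices : List Int) (pi : Int) (s m : Nat)
    (hs : s ≤ m) (hm : m < prices.length) (hlt : prices.getD m 0 < pi)
    (h : ∀ j, s ≤ j → j < m → pi ≤ prices.getD j 0) :
    findDrop prices pi s = some m := by
  unfold findDrop
  rcases Nat.eq_or_lt_of_le hs with heq | hlt'
  · subst heq
    rw [dif_pos hm, if_pos hlt]
  · have hsl : s < prices.length := by omega
    rw [dif_pos hsl, if_neg (by have := h s le_rfl hlt'; omega)]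
    exact findDrop_some prices pi (s + 1) m (by omega) hm hlt
      (fun j hj hj' => h j (by omega) hj')
termination_by prices.length - s

-- value B assigns at an index whose price never drops later
theorem bVal_no_drop (prices : List Int) (t : Nat)
    (h : ∀ j, t < j → j < prices.length → prices.getD t 0 ≤ prices.getD j 0) :
    bVal prices t = (prices.length : Int) - 1 - (t : Int) := by
  unfold bVal
  rw [findDrop_none prices _ (t + 1) (fun j hj hj' => h j (by omega) hj')]

-- value B assigns at an index whose first strictly smaller later price is at m
theorem bVal_drop (prices : List Int) (t m : Nat) (htm : t < m) (hm : m < prices.length)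
    (hlt : prices.getD m 0 < prices.getD t 0)
    (h : ∀ j, t < j → j < m → prices.getD t 0 ≤ prices.getD j 0) :
    bVal prices t = (m : Int) - (t : Int) := by
  unfold bVal
  rw [findDrop_some prices _ (t + 1) m (by omega) hm hlt
    (fun j hj hj' => h j (by omega) hj')]

theorem drainA_length (answer : List Int) (stack : List (Int × Nat)) (tlast : Int) :
    (drainA answer stack tlast).length = answer.length := by
  induction stack generalizing answer with
  | nil => rfl
  | cons x rest ih => simp [drainA, ih]

theorem loopA_length (prices answer : List Int) (stack : List (Int × Nat)) (time : Nat) :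
    (loopA prices answer stack time).length = answer.length := by
  unfold loopA
  split
  · rename_i h
    match stack with
    | [] => rw [loopA_length]
    | (tp, tt) :: rest =>
      simp only []
      split
      · rw [loopA_length]; simp
      · rw [loopA_length]
  · exact drainA_length ..
termination_by 2 * (prices.length - time) + stack.length
decreasing_by all_goals first | (simp; omega) | simp

theorem drainA_getD (prices answer : List Int) (stack : List (Int × Nat))
    (hlen : answer.length = prices.length)
    (hinv : InvStack prices prices.length stack)
    (hans : ∀ i, i < prices.length → i ∉ stack.map Prod.snd →
      answer.getD i 0 = bVal prices i) :
    ∀ i, i < prices.length →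
      (drainA answer stack ((prices.length : Int) - 1)).getD i 0 = bVal prices i := by
  induction stack generalizing answer with
  | nil => exact fun i hi => hans i hi (by simp)
  | cons x rest ih =>
    obtain ⟨hpw, hmem⟩ := hinv
    obtain ⟨hx1, hx2, hx3⟩ := hmem x (by simp)
    apply ih
    · simp [hlen]
    · exact ⟨hpw.of_cons, fun y hy => hmem y (List.mem_cons_of_mem _ hy)⟩
    · intro i hi hnot
      by_cases hix : i = x.2
      · subst hix
        rw [getD_set_self answer x.2 _ (by omega)]
        rw [bVal_no_drop prices x.2 (by rw [← hx1]; exact hx3)]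
      · rw [getD_set_ne answer x.2 i _ (Ne.symm hix)]
        refine hans i hi ?_
        intro hmem'
        simp only [List.map_cons, List.mem_cons] at hmem'
        rcases hmem' with h | h
        · exact hix h
        · exact hnot h

theorem loopA_getD (prices answer : List Int) (stack : List (Int × Nat)) (time : Nat)
    (hlen : answer.length = prices.length)
    (htime : time ≤ prices.length)
    (hinv : InvStack prices time stack)
    (hans : ∀ i, i < time → i ∉ stack.map Prod.snd →
      answer.getD i 0 = bVal prices i) :
    ∀ i, i < prices.length →
      (loopA prices answer stack time).getD i 0 = bVal prices i := by
  unfold loopA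
  split
  · rename_i hlt
    match stack with
    | [] =>
      simp only []
      apply loopA_getD prices answer [(prices.getD time 0, time)] (time + 1) hlen (by omega)
      · refine ⟨by simp, ?_⟩
        rintro x hx
        simp at hx
        subst hx
        exact ⟨rfl, by omega, by intro j hj hj'; omega⟩
      · intro i hi hnot
        simp at hnot
        exact hans i (by omega) (by simp)
    | (tp, tt) :: rest =>
      obtain ⟨hpw, hmem⟩ := hinv
      obtain ⟨hx1, hx2, hx3⟩ := hmem (tp, tt) (by simp)
      simp only at hx1 hx2 hx3
      have hrest : ∀ b ∈ rest, b.1 ≤ tp ∧ b.2 < tt := by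
        intro b hb; exact (List.pairwise_cons.mp hpw).1 b hb
      simp only []
      split
      · rename_i hdrop
        apply loopA_getD prices _ rest time (by simp [hlen]) htime
        · exact ⟨hpw.of_cons, fun y hy => hmem y (List.mem_cons_of_mem _ hy)⟩
        · intro i hi hnot
          by_cases hix : i = tt
          · subst hix
            rw [getD_set_self answer i _ (by omega)]
            rw [bVal_drop prices i time (by omega) hlt (by rw [← hx1]; exact hdrop)
              (by rw [← hx1]; exact hx3)]
          · rw [getD_set_ne answer tt i _ (Ne.symm hix)]
            refine hans i hi ?_
            intro hmem'
            simp only [List.map_cons, List.mem_cons] at hmem'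
            rcases hmem' with h | h
            · exact hix h
            · exact hnot h
      · rename_i hkeep
        have hkeep' : tp ≤ prices.getD time 0 := not_lt.mp hkeep
        apply loopA_getD prices answer ((prices.getD time 0, time) :: (tp, tt) :: rest)
          (time + 1) hlen (by omega)
        · constructor
          · rw [List.pairwise_cons]
            refine ⟨?_, hpw⟩
            intro b hb
            rcases List.mem_cons.mp hb with hb | hb
            · subst hb; exact ⟨hkeep', hx2⟩
            · obtain ⟨h1, h2⟩ := hrest b hb
              exact ⟨le_trans h1 hkeep', by
                have := (hmem b (List.mem_cons_of_mem _ hb)).2.1; omega⟩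
          · intro x hx
            rcases List.mem_cons.mp hx with hxe | hxold
            · subst hxe
              exact ⟨rfl, by omega, by intro j hj hj'; omega⟩
            · obtain ⟨h1, h2, h3⟩ := hmem x hxold
              refine ⟨h1, by omega, ?_⟩
              intro j hj hj'
              rcases Nat.lt_or_ge j time with hjt | hjt
              · exact h3 j hj hjt
              · have hjeq : j = time := by omega
                subst hjeq
                have hx1' : x.1 ≤ tp := by
                  rcases List.mem_cons.mp hxold with h | h
                  · rw [h]
                  · exact (hrest x h).1
                exact le_trans hx1' hkeep'
        · intro i hi hnot
          have hne : i ≠ time := fun h => hnot (by simp [h])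
          refine hans i (by omega) ?_
          intro hmem'
          exact hnot (by
            simp only [List.map_cons, List.mem_cons] at hmem' ⊢
            tauto)
  · rename_i hge
    have htimeL : time = prices.length := by omega
    subst htimeL
    exact drainA_getD prices answer stack hlen hinv hans
termination_by 2 * (prices.length - time) + stack.length
decreasing_by all_goals first | (simp; omega) | simp

theorem solution_length (prices : List Int) : (solution prices).length = prices.length := by
  unfold solution; rw [loopA_length]; simp

-- ===== VERDICT (by name: the statement is the Claim_ definition above) =====
theorem solution_spec : Claim_equal_solution := by
  intro prices _
  unfold Spec_solution solution_alt
  apply List.ext_getElem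
  · simp [solution_length]
  · intro i hi hi'
    have h1 : (solution prices)[i] = (solution prices).getD i 0 := by
      rw [List.getD_eq_getElem _ _ hi]
    have h2 := loopA_getD prices (List.replicate prices.length 0) [] 0
      (by simp) (by omega) ⟨List.Pairwise.nil, by simp⟩ (by intro i hi; omega)
      i (by simpa [solution_length] using hi)
    simp only [List.getElem_map, List.getElem_range]
    rw [h1]
    unfold solution
    exact h2
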